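-- pv_equiv track=rewrite | github.com/bredmond1019/graphql-mcp-server | src/healthie_mcp/tools/todo/rate_limit_advisor.py | _determine_pattern_type
-- ===== SOURCE A (Python) =====
-- def _determine_pattern_type(pattern: str) -> str:
--     """Determine the type category for a query pattern."""
--     pattern_lower = pattern.lower()
--
--     if "patient" in pattern_lower:
--         if "demographic" in pattern_lower:
--             return "Patient Demographics"
--         elif "phi" in pattern_lower:
--             return "Patient PHI Data"
--         else:
--             return "Patient Management"
--     elif "appointment" in pattern_lower:
--         return "Appointment Management"
--     elif any(term in pattern_lower for term in ["billing", "claim", "payment", "insurance"]):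
--         return "Billing Operations"
--     elif "provider" in pattern_lower:
--         return "Provider Management"
--     elif any(term in pattern_lower for term in ["clinical", "note", "form", "lab"]):
--         return "Clinical Documentation"
--     else:
--         return "General Operations"
-- ===== SOURCE B (Python) =====
-- _RULES = [
--     (["patient", "demographic"], "Patient Demographics"),
--     (["patient", "phi"], "Patient PHI Data"),
--     (["patient"], "Patient Management"),
--     (["appointment"], "Appointment Management"),
--     (["billing"], "Billing Operations"),
--     (["claim"], "Billing Operations"),
--     (["payment"], "Billing Operations"),
--     (["insurance"], "Billing Operations"),
--     (["provider"], "Provider Management"),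
--     (["clinical"], "Clinical Documentation"),
--     (["note"], "Clinical Documentation"),
--     (["form"], "Clinical Documentation"),
--     (["lab"], "Clinical Documentation"),
-- ]
--
-- def _determine_pattern_type(pattern: str) -> str:
--     low = pattern.lower()
--     for keywords, category in _RULES:
--         if all(k in low for k in keywords):
--             return category
--     return "General Operations"
-- ===== Notes on version B (the rewrite author's own statement) =====
-- stated objective: simpler
-- what changed: Replaced the nested if/elif keyword cascade with an ordered rule table (keyword-list, category) scanned for the first rule whose every keyword is a substring.
import Mathlib
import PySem

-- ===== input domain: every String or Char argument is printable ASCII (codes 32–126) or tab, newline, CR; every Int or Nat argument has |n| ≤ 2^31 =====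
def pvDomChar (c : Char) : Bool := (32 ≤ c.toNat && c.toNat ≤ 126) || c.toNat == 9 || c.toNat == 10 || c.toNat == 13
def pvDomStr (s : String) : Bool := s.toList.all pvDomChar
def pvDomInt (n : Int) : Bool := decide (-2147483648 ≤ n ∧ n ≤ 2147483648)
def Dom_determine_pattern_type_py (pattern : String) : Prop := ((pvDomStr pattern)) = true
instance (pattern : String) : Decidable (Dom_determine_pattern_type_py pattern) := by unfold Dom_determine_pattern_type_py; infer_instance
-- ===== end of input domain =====

-- B replaces A's nested if/elif keyword cascade with an ordered rule table scanned for the first all-keywords match (objective: simpler).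

-- ===== PORT A =====
def determine_pattern_type_py (pattern : String) : String :=
  let pattern_lower := PySem.Str.lower pattern
  if PySem.Str.isIn "patient" pattern_lower then
    if PySem.Str.isIn "demographic" pattern_lower then "Patient Demographics"
    else if PySem.Str.isIn "phi" pattern_lower then "Patient PHI Data"
    else "Patient Management"
  else if PySem.Str.isIn "appointment" pattern_lower then "Appointment Management"
  else if ["billing", "claim", "payment", "insurance"].any (fun term => PySem.Str.isIn term pattern_lower) then
    "Billing Operations"
  else if PySem.Str.isIn "provider" pattern_lower then "Provider Management"
  else if ["clinical", "note", "form", "lab"].any (fun term => PySem.Str.isIn term pattern_lower) then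
    "Clinical Documentation"
  else "General Operations"

-- ===== PORT B =====
def pvRules : List (List String × String) :=
  [ (["patient", "demographic"], "Patient Demographics"),
    (["patient", "phi"], "Patient PHI Data"),
    (["patient"], "Patient Management"),
    (["appointment"], "Appointment Management"),
    (["billing"], "Billing Operations"),
    (["claim"], "Billing Operations"),
    (["payment"], "Billing Operations"),
    (["insurance"], "Billing Operations"),
    (["provider"], "Provider Management"),
    (["clinical"], "Clinical Documentation"),
    (["note"], "Clinical Documentation"),
    (["form"], "Clinical Documentation"),
    (["lab"], "Clinical Documentation") ]

def pvScanRules (low : String) : List (List String × String) → String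
  | [] => "General Operations"
  | (keywords, category) :: rest =>
      if keywords.all (fun k => PySem.Str.isIn k low) then category
      else pvScanRules low rest

def determine_pattern_type_py_alt (pattern : String) : String :=
  pvScanRules (PySem.Str.lower pattern) pvRules

-- ===== PRECONDITION & SPEC =====
def Spec_determine_pattern_type_py (pattern : String) (out : String) : Prop := out = determine_pattern_type_py_alt pattern
instance (pattern : String) (out : String) : Decidable (Spec_determine_pattern_type_py pattern out) := by unfold Spec_determine_pattern_type_py; infer_instance

-- ===== CLAIM (what is proved, stated in full; the proofs are below) =====
def Claim_equal_determine_pattern_type_py : Prop := ∀ (pattern : String), Dom_determine_pattern_type_py pattern → Spec_determine_pattern_type_py pattern (determine_pattern_type_py pattern)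

-- ===== LEMMAS AND PROOFS =====

-- ===== VERDICT (by name: the statement is the Claim_ definition above) =====
theorem pv_if_por {α : Type} (p q : Prop) [Decidable p] [Decidable q] (v x : α) :
    (if p ∨ q then v else x) = if p then v else if q then v else x := by
  by_cases hp : p <;> by_cases hq : q <;> simp [hp, hq]

set_option maxHeartbeats 1000000 in
theorem determine_pattern_type_py_spec : Claim_equal_determine_pattern_type_py := by
  intro pattern _
  unfold Spec_determine_pattern_type_py determine_pattern_type_py determine_pattern_type_py_alt pvRules
  simp only [pvScanRules, List.any_cons, List.any_nil, List.all_cons, List.all_nil,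
    Bool.and_true, Bool.or_false]
  by_cases h1 : PySem.Chars.isIn ['p', 'a', 't', 'i', 'e', 'n', 't'] (PySem.Chars.lower pattern.toList) = true <;>
    simp [h1, pv_if_por]
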